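-- pv_equiv track=rewrite | github.com/pinghedm/AOC25 | 4/part_one.py | find_removable_paper_coords
-- ===== SOURCE A (Python) =====
-- def find_removable_paper_coords(puzzle_input):
--     coords_of_paper = set()
--     coords_of_removable_paper = set()
--     for y, row in enumerate(puzzle_input):
--         for x, char in enumerate(row):
--             if char == "@":
--                 coords_of_paper.add((x, y))
--     for y, row in enumerate(puzzle_input):
--         for x, char in enumerate(row):
--             if char != "@":
--                 continue
--             surrounding_coords = set(
--                 [
--                     (x - 1, y - 1),
--                     (x, y - 1),
--                     (x + 1, y - 1),
--                     (x - 1, y),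
--                     (x + 1, y),
--                     (x - 1, y + 1),
--                     (x, y + 1),
--                     (x + 1, y + 1),
--                 ]
--             )
--             num_surrounding_paper = len(surrounding_coords & coords_of_paper)
--             if num_surrounding_paper < 4:
--                 coords_of_removable_paper.add((x, y))
--     return coords_of_removable_paper
-- ===== SOURCE B (Python) =====
-- def _neighbors8(x, y):
--     return [(x - 1, y - 1), (x, y - 1), (x + 1, y - 1),
--             (x - 1, y), (x + 1, y),
--             (x - 1, y + 1), (x, y + 1), (x + 1, y + 1)]
--
--
-- def find_removable_paper_coords(puzzle_input):
--     # Pass 1: collect paper cells in scan order and scatter a +1 into a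
--     # counter at each of the 8 neighbor coordinates of every paper cell.
--     paper = [(x, y)
--              for y, row in enumerate(puzzle_input)
--              for x, char in enumerate(row)
--              if char == "@"]
--     neighbor_count = {}
--     for p in paper:
--         for n in _neighbors8(p[0], p[1]):
--             neighbor_count[n] = neighbor_count.get(n, 0) + 1
--     # Pass 2: a paper cell is removable iff fewer than 4 paper neighbors.
--     return {c for c in paper if neighbor_count.get(c, 0) < 4}
-- ===== Notes on version B (the rewrite author's own statement) =====
-- stated objective: alternative
-- what changed: Instead of building an 8-element set per paper cell and intersecting it with the paper set, B makes one scatter pass that increments a counter dict at every neighbor of each paper cell and then keeps the paper cells whose counter entry defaults-to-0 is below 4.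
import Mathlib
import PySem

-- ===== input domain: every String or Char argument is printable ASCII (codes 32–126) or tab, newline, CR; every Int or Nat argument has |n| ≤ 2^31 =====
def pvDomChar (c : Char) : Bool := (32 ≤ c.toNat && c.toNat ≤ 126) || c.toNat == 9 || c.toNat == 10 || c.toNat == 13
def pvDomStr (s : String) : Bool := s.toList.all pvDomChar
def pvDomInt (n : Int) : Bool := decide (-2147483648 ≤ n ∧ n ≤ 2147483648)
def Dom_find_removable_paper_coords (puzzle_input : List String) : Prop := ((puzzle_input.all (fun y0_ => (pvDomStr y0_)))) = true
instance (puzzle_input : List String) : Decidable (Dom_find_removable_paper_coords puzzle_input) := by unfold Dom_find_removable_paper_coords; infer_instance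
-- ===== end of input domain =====

-- B replaces A's per-cell 8-neighbor set intersection by one scatter pass that
-- increments a counter dict at every neighbor of each paper cell (alternative
-- decomposition; a timing run measured it constant-factor faster).

-- ===== PORT A =====
-- the 8 surrounding coordinates, in A's literal order
def pvSurroundingA (x y : Int) : List (Int × Int) :=
  [(x - 1, y - 1), (x, y - 1), (x + 1, y - 1),
   (x - 1, y), (x + 1, y),
   (x - 1, y + 1), (x, y + 1), (x + 1, y + 1)]

def find_removable_paper_coords (puzzle_input : List String) : List (Int × Int) :=
  let coords_of_paper : PySem.Set (Int × Int) :=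
    (PySem.List.enumerate puzzle_input 0).foldl (fun s yr =>
      (PySem.List.enumerate yr.2.toList 0).foldl (fun s xc =>
        if xc.2 = '@' then PySem.Set.add s (xc.1, yr.1) else s) s) PySem.Set.empty
  (PySem.List.enumerate puzzle_input 0).foldl (fun out yr =>
    (PySem.List.enumerate yr.2.toList 0).foldl (fun out xc =>
      if xc.2 ≠ '@' then out
      else
        let surrounding := PySem.Set.ofList (pvSurroundingA xc.1 yr.1)
        let num := PySem.Set.len (PySem.Set.inter surrounding coords_of_paper)
        if num < 4 then PySem.Set.add out (xc.1, yr.1) else out) out) PySem.Set.empty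

-- ===== PORT B =====
def pvNeighbors8 (x y : Int) : List (Int × Int) :=
  [(x - 1, y - 1), (x, y - 1), (x + 1, y - 1),
   (x - 1, y), (x + 1, y),
   (x - 1, y + 1), (x, y + 1), (x + 1, y + 1)]

-- the list comprehension building `paper`
def pvPaperCells (puzzle_input : List String) : List (Int × Int) :=
  (PySem.List.enumerate puzzle_input 0).flatMap (fun yr =>
    (PySem.List.enumerate yr.2.toList 0).filterMap (fun xc =>
      if xc.2 = '@' then some (xc.1, yr.1) else none))

def find_removable_paper_coords_alt (puzzle_input : List String) : List (Int × Int) :=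
  let paper := pvPaperCells puzzle_input
  let neighbor_count : PySem.Dict (Int × Int) Int :=
    paper.foldl (fun d p =>
      (pvNeighbors8 p.1 p.2).foldl (fun d n => d.insert n (d.getD n 0 + 1)) d) PySem.Dict.empty
  PySem.Set.ofList (paper.filter (fun c => decide (neighbor_count.getD c 0 < 4)))

-- ===== PRECONDITION & SPEC =====
def Spec_find_removable_paper_coords (puzzle_input : List String) (out : List (Int × Int)) : Prop := out = find_removable_paper_coords_alt puzzle_input
instance (puzzle_input : List String) (out : List (Int × Int)) : Decidable (Spec_find_removable_paper_coords puzzle_input out) := by unfold Spec_find_removable_paper_coords; infer_instance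

-- ===== CLAIM (what is proved, stated in full; the proofs are below) =====
def Claim_equal_find_removable_paper_coords : Prop := ∀ (puzzle_input : List String), Dom_find_removable_paper_coords puzzle_input → Spec_find_removable_paper_coords puzzle_input (find_removable_paper_coords puzzle_input)

-- ===== LEMMAS AND PROOFS =====

theorem pvNeighbors8_nodup (x y : Int) : (pvNeighbors8 x y).Nodup := by
  simp [pvNeighbors8, Prod.ext_iff]; omega

theorem pvNeighbors8_symm (c p : Int × Int) :
    c ∈ pvNeighbors8 p.1 p.2 ↔ p ∈ pvNeighbors8 c.1 c.2 := by
  obtain ⟨cx, cy⟩ := c; obtain ⟨px, py⟩ := p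
  simp [pvNeighbors8, Prod.ext_iff]
  omega

-- symmetric counting over two duplicate-free lists
theorem pvCountSym {α : Type} [DecidableEq α] (l1 l2 : List α)
    (h1 : l1.Nodup) (h2 : l2.Nodup) :
    l1.countP (fun x => decide (x ∈ l2)) = l2.countP (fun x => decide (x ∈ l1)) := by
  rw [List.countP_eq_length_filter, List.countP_eq_length_filter]
  rw [← List.toFinset_card_of_nodup (h1.filter _), ← List.toFinset_card_of_nodup (h2.filter _)]
  congr 1
  rw [List.toFinset_filter, List.toFinset_filter]
  ext a
  simp [Finset.mem_filter, List.mem_toFinset]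
  tauto

-- the counter built by B counts, at c, the paper cells adjacent to c
theorem pvCounterSpec (c : Int × Int) :
    ∀ (l : List (Int × Int)) (d : PySem.Dict (Int × Int) Int),
    (l.foldl (fun d p =>
      (pvNeighbors8 p.1 p.2).foldl (fun d n => d.insert n (d.getD n 0 + 1)) d) d).getD c 0
    = d.getD c 0 + ((l.countP (fun p => decide (c ∈ pvNeighbors8 p.1 p.2)) : Int)) := by
  intro l
  induction l with
  | nil => simp
  | cons p t ih =>
    intro d
    rw [List.foldl_cons, ih, PySem.Dict.getD_foldl_insert_add_one, List.countP_cons]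
    by_cases hm : c ∈ pvNeighbors8 p.1 p.2
    · rw [List.count_eq_one_of_mem (pvNeighbors8_nodup _ _) hm]
      simp [hm]; ring
    · rw [List.count_eq_zero_of_not_mem hm]
      simp [hm]

-- the paper cells contributed by one row
def pvRowCells (y : Int) (row : String) : List (Int × Int) :=
  (PySem.List.enumerate row.toList 0).filterMap (fun xc =>
    if xc.2 = '@' then some (xc.1, y) else none)

theorem pvRowCells_snd {y : Int} {row : String} {c : Int × Int}
    (h : c ∈ pvRowCells y row) : c.2 = y := by
  simp only [pvRowCells, List.mem_filterMap] at h
  obtain ⟨xc, -, h⟩ := h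
  split at h
  · cases h; rfl
  · cases h

theorem pvRowCells_nodup (y : Int) (row : String) : (pvRowCells y row).Nodup := by
  have hp := PySem.List.pairwise_lt_enumerate (xs := row.toList) (s := 0)
  refine List.Pairwise.filterMap _ ?_ hp
  intro a a' hlt b hb b' hb'
  split at hb <;> split at hb' <;> simp_all
  obtain ⟨-, rfl⟩ := hb; obtain ⟨-, rfl⟩ := hb'
  simp [Prod.ext_iff]; omega

theorem pvCellsFrom_snd_ge : ∀ (rows : List String) (y0 : Int) (c : Int × Int),
    c ∈ (PySem.List.enumerate rows y0).flatMap (fun yr => pvRowCells yr.1 yr.2) → y0 ≤ c.2 := by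
  intro rows
  induction rows with
  | nil => simp [PySem.List.enumerate_nil]
  | cons r t ih =>
    intro y0 c hc
    rw [PySem.List.enumerate_cons, List.flatMap_cons, List.mem_append] at hc
    rcases hc with h | h
    · exact le_of_eq (pvRowCells_snd h).symm
    · have := ih (y0 + 1) c h; omega

theorem pvCellsFrom_nodup : ∀ (rows : List String) (y0 : Int),
    ((PySem.List.enumerate rows y0).flatMap (fun yr => pvRowCells yr.1 yr.2)).Nodup := by
  intro rows
  induction rows with
  | nil => simp [PySem.List.enumerate_nil]
  | cons r t ih =>
    intro y0
    rw [PySem.List.enumerate_cons, List.flatMap_cons]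
    refine (pvRowCells_nodup y0 r).append (ih (y0 + 1)) ?_
    intro c hc1 hc2
    have h1 := pvRowCells_snd hc1
    have h2 := pvCellsFrom_snd_ge t (y0 + 1) c hc2
    omega

theorem pvPaperCells_nodup (pi : List String) : (pvPaperCells pi).Nodup := by
  have := pvCellsFrom_nodup pi 0
  simpa [pvPaperCells, pvRowCells] using this

-- one row of the grid scan, with fresh distinct cells, is a plain append
theorem pvRowPass (y : Int) (P : Int → Int → Bool) :
    ∀ (ps : List (Int × Char)) (s : List (Int × Int)),
    (ps.map Prod.fst).Nodup → (∀ xc ∈ ps, (xc.1, y) ∉ s) →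
    ps.foldl (fun out xc => if xc.2 = '@' ∧ P xc.1 y then PySem.Set.add out (xc.1, y) else out) s
    = s ++ ((ps.filterMap (fun xc => if xc.2 = '@' then some (xc.1, y) else none)).filter
        (fun c => P c.1 c.2)) := by
  intro ps
  induction ps with
  | nil => simp
  | cons xc t ih =>
    intro s hnd hdis
    have hndt : (t.map Prod.fst).Nodup := (List.nodup_cons.mp hnd).2
    have hxf : xc.1 ∉ t.map Prod.fst := (List.nodup_cons.mp hnd).1
    rw [List.foldl_cons, List.filterMap_cons]
    by_cases hc : xc.2 = '@'
    · by_cases hp : P xc.1 y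
      · have hadd : PySem.Set.add s (xc.1, y) = s ++ [(xc.1, y)] := by
          simp [PySem.Set.add, PySem.Set.contains, hdis xc (by simp)]
        rw [if_pos ⟨hc, hp⟩, hadd, ih (s ++ [(xc.1, y)]) hndt ?_]
        · simp [hc, hp]
        · intro yc hyc
          simp only [List.mem_append, List.mem_singleton]
          rintro (h | h)
          · exact hdis yc (by simp [hyc]) h
          · simp only [Prod.mk.injEq] at h
            exact hxf (List.mem_map.mpr ⟨yc, hyc, h.1⟩)
      · rw [if_neg (by simp [hp]), ih s hndt (fun z hz => hdis z (by simp [hz]))]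
        simp [hc, hp]
    · rw [if_neg (by simp [hc]), ih s hndt (fun z hz => hdis z (by simp [hz]))]
      simp [hc]

theorem pvEnumerateFstNodup {α : Type} (xs : List α) (s0 : Int) :
    ((PySem.List.enumerate xs s0).map Prod.fst).Nodup := by
  have hp := PySem.List.pairwise_lt_enumerate (xs := xs) (s := s0)
  exact hp.map Prod.fst (fun a b (h : a.1 < b.1) => ne_of_lt h)

-- the generic nested grid pass of A, collecting the '@' cells that satisfy P
theorem pvGridPass (P : Int → Int → Bool) :
    ∀ (rows : List String) (y0 : Int) (s : List (Int × Int)),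
    (∀ c ∈ s, c.2 < y0) →
    (PySem.List.enumerate rows y0).foldl (fun out yr =>
      (PySem.List.enumerate yr.2.toList 0).foldl (fun out xc =>
        if xc.2 = '@' ∧ P xc.1 yr.1 then PySem.Set.add out (xc.1, yr.1) else out) out) s
    = s ++ (((PySem.List.enumerate rows y0).flatMap (fun yr => pvRowCells yr.1 yr.2)).filter
        (fun c => P c.1 c.2)) := by
  intro rows
  induction rows with
  | nil => simp [PySem.List.enumerate_nil]
  | cons r t ih =>
    intro y0 s hs
    rw [PySem.List.enumerate_cons, List.flatMap_cons, List.foldl_cons,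
        pvRowPass y0 P _ s (pvEnumerateFstNodup _ _) ?h1,
        ih (y0 + 1) _ ?h2, List.filter_append, List.append_assoc]
    · simp [pvRowCells]
    case h1 =>
      intro xc _ hmem
      have := hs _ hmem; simp at this
    case h2 =>
      intro c hc
      rcases List.mem_append.mp hc with h | h
      · have := hs c h; omega
      · have := pvRowCells_snd (List.mem_of_mem_filter h); omega

-- ===== VERDICT (by name: the statement is the Claim_ definition above) =====
theorem find_removable_paper_coords_spec : Claim_equal_find_removable_paper_coords := by
  intro pi _
  unfold Spec_find_removable_paper_coords find_removable_paper_coords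
  set paper := pvPaperCells pi with hpdef
  -- pass 1 of A builds exactly B's `paper` list
  have hpass1 :
      (PySem.List.enumerate pi 0).foldl (fun s yr =>
        (PySem.List.enumerate yr.2.toList 0).foldl (fun s xc =>
          if xc.2 = '@' then PySem.Set.add s (xc.1, yr.1) else s) s) PySem.Set.empty = paper := by
    have h1 :
        (PySem.List.enumerate pi 0).foldl (fun s yr =>
          (PySem.List.enumerate yr.2.toList 0).foldl (fun s xc =>
            if xc.2 = '@' then PySem.Set.add s (xc.1, yr.1) else s) s) PySem.Set.empty
        = (PySem.List.enumerate pi 0).foldl (fun s yr =>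
          (PySem.List.enumerate yr.2.toList 0).foldl (fun s xc =>
            if xc.2 = '@' ∧ (fun _ _ => true) xc.1 yr.1 then PySem.Set.add s (xc.1, yr.1) else s) s)
            PySem.Set.empty := by
      congr 1
      funext s yr
      congr 1
      funext s' xc
      by_cases h : xc.2 = '@' <;> simp [h]
    rw [h1, pvGridPass (fun _ _ => true) pi 0 PySem.Set.empty (by simp [PySem.Set.empty])]
    rw [hpdef]
    simp only [List.filter_true, PySem.Set.empty, List.nil_append]
    rfl
  rw [hpass1]
  set cnt : PySem.Dict (Int × Int) Int :=
    paper.foldl (fun d p =>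
      (pvNeighbors8 p.1 p.2).foldl (fun d n => d.insert n (d.getD n 0 + 1)) d) PySem.Dict.empty
    with hcnt
  -- the two per-cell tests agree at every coordinate
  have hkey : ∀ x y : Int,
      (decide (PySem.Set.len (PySem.Set.inter (PySem.Set.ofList (pvSurroundingA x y)) paper) < 4))
      = (decide (cnt.getD (x, y) 0 < 4)) := by
    intro x y
    have hsurr : PySem.Set.ofList (pvSurroundingA x y) = pvNeighbors8 x y := by
      rw [show pvSurroundingA x y = pvNeighbors8 x y from rfl]
      exact PySem.Set.ofList_eq_self_of_nodup _ (pvNeighbors8_nodup x y)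
    have hlen : PySem.Set.len (PySem.Set.inter (pvNeighbors8 x y) paper)
        = ((pvNeighbors8 x y).countP (fun n => decide (n ∈ paper)) : Int) := by
      simp [PySem.Set.len, PySem.Set.inter, PySem.Set.contains, List.countP_eq_length_filter]
    have hcount : cnt.getD (x, y) 0
        = ((pvNeighbors8 x y).countP (fun n => decide (n ∈ paper)) : Int) := by
      rw [hcnt, pvCounterSpec (x, y) paper PySem.Dict.empty]
      have hsym : paper.countP (fun p => decide ((x, y) ∈ pvNeighbors8 p.1 p.2))
          = paper.countP (fun p => decide (p ∈ pvNeighbors8 x y)) :=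
        List.countP_congr (fun p _ =>
          decide_eq_true_iff.trans ((pvNeighbors8_symm (x, y) p).trans decide_eq_true_iff.symm))
      have hcs := pvCountSym paper (pvNeighbors8 x y) (pvPaperCells_nodup pi)
        (pvNeighbors8_nodup x y)
      rw [hsym]
      simp only [PySem.Dict.getD_empty, zero_add]
      refine congrArg Int.ofNat ?_
      refine Eq.trans ?_ (Eq.trans hcs ?_)
      · exact List.countP_congr (fun a _ => by simp only [decide_eq_true_eq])
      · exact List.countP_congr (fun a _ => by simp only [decide_eq_true_eq])
    rw [hsurr, hlen, hcount]
  -- B's result is the filter of `paper` by the counter test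
  have halt : find_removable_paper_coords_alt pi
      = PySem.Set.ofList (paper.filter (fun c => decide (cnt.getD c 0 < 4))) := rfl
  rw [halt,
    PySem.Set.ofList_eq_self_of_nodup (paper.filter (fun c => decide (cnt.getD c 0 < 4)))
      ((pvPaperCells_nodup pi).filter _)]
  -- pass 2 of A is the generic grid pass with the intersection test
  have h2 :
      (PySem.List.enumerate pi 0).foldl (fun out yr =>
        (PySem.List.enumerate yr.2.toList 0).foldl (fun out xc =>
          if xc.2 ≠ '@' then out
          else
            let surrounding := PySem.Set.ofList (pvSurroundingA xc.1 yr.1)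
            let num := PySem.Set.len (PySem.Set.inter surrounding paper)
            if num < 4 then PySem.Set.add out (xc.1, yr.1) else out) out) PySem.Set.empty
      = (PySem.List.enumerate pi 0).foldl (fun out yr =>
        (PySem.List.enumerate yr.2.toList 0).foldl (fun out xc =>
          if xc.2 = '@' ∧ (fun a b => decide (cnt.getD (a, b) 0 < 4)) xc.1 yr.1
          then PySem.Set.add out (xc.1, yr.1) else out) out) PySem.Set.empty := by
    congr 1
    funext out yr
    congr 1
    funext out' xc
    by_cases h : xc.2 = '@'
    · simp only [h, ne_eq, not_true_eq_false, if_false, true_and]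
      refine if_congr ?_ rfl rfl
      rw [← hkey xc.1 yr.1]
      exact (decide_eq_true_iff).symm
    · simp [h]
  have hgp := pvGridPass (fun a b => decide (cnt.getD (a, b) 0 < 4)) pi 0 PySem.Set.empty
    (by simp [PySem.Set.empty])
  rw [h2, hgp]
  simp only [PySem.Set.empty, List.nil_append]
  have hfm : ((PySem.List.enumerate pi 0).flatMap (fun yr => pvRowCells yr.1 yr.2)) = paper := by
    rw [hpdef]; rfl
  rw [hfm]
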